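-- pv_equiv track=rewrite | github.com/fcpratik/Cross-Lingual_Relation_Extraction | Q2/infer_generative.py | find_closest_label
-- ===== SOURCE A (Python) =====
-- def find_closest_label(generated, valid_labels):
--     """
--     Post-process: match generated text to closest valid ontology label.
--     Uses exact match first, then substring match, then defaults to NA.
--     """
--     generated = generated.strip()
--
--     # Exact match
--     if generated in valid_labels:
--         return generated
--
--     # Case-insensitive exact match
--     gen_lower = generated.lower()
--     for lbl in valid_labels:
--         if lbl.lower() == gen_lower:
--             return lbl
--
--     # Substring match (generated contains a valid label)
--     for lbl in valid_labels:
--         if lbl in generated: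
--             return lbl
--
--     # Substring match (valid label contains generated)
--     for lbl in valid_labels:
--         if generated in lbl and len(generated) > 3:
--             return lbl
--
--     # Partial path match (match last component)
--     gen_parts = generated.strip("/").split("/")
--     best_match = None
--     best_score = 0
--     for lbl in valid_labels:
--         lbl_parts = lbl.strip("/").split("/")
--         # Count matching parts from the end
--         score = 0
--         for gp, lp in zip(reversed(gen_parts), reversed(lbl_parts)):
--             if gp.lower() == lp.lower():
--                 score += 1
--             else:
--                 break
--         if score > best_score:
--             best_score = score
--             best_match = lbl
--
--     if best_match and best_score > 0:
--         return best_match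
--
--     return "NA"
-- ===== SOURCE B (Python) =====
-- def find_closest_label(generated, valid_labels):
--     """One pass over valid_labels maintaining the first match of each category."""
--     generated = generated.strip()
--     if generated in valid_labels:
--         return generated
--     gen_lower = generated.lower()
--     gen_parts = generated.strip("/").split("/")
--     ci = sub1 = sub2 = best = None
--     best_score = 0
--     for lbl in valid_labels:
--         if ci is None and lbl.lower() == gen_lower:
--             ci = lbl
--         if sub1 is None and lbl in generated:
--             sub1 = lbl
--         if sub2 is None and generated in lbl and len(generated) > 3:
--             sub2 = lbl
--         score = 0
--         for gp, lp in zip(reversed(gen_parts), reversed(lbl.strip("/").split("/"))):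
--             if gp.lower() == lp.lower():
--                 score += 1
--             else:
--                 break
--         if score > best_score:
--             best_score = score
--             best = lbl
--     if ci is not None:
--         return ci
--     if sub1 is not None:
--         return sub1
--     if sub2 is not None:
--         return sub2
--     if best and best_score > 0:
--         return best
--     return "NA"
-- ===== Notes on version B (the rewrite author's own statement) =====
-- stated objective: alternative
-- what changed: Replaces A's four sequential scans of valid_labels (case-insensitive, substring each way, best path score) by a single pass maintaining the first match of each category plus the best path score, returning them in the original priority order.
import Mathlib
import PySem

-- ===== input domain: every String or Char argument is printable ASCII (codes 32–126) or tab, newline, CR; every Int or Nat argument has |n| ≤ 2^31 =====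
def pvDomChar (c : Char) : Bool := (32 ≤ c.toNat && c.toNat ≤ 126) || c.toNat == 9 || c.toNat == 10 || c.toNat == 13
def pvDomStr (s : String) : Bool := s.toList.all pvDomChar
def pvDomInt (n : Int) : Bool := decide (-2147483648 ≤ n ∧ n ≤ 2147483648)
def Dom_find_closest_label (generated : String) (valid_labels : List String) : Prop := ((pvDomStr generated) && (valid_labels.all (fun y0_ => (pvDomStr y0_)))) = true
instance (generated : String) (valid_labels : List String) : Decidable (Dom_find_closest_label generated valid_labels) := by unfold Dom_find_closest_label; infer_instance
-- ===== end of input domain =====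

-- B changes the decomposition: one pass with four first-match slots instead of A's four sequential scans; same cost, no speed claim.

-- ===== PORT A =====
-- the per-label conditions of A's three early-return loops (shared literally by B's Python)
def pvP1 (gl lbl : String) : Bool := PySem.Str.lower lbl == gl                              -- lbl.lower() == gen_lower
def pvP2 (g lbl : String) : Bool := PySem.Str.isIn lbl g                                   -- lbl in generated
def pvP3 (g lbl : String) : Bool := PySem.Str.isIn g lbl && decide (3 < PySem.Str.len g)   -- generated in lbl and len(generated) > 3

-- s.strip("/").split("/")
def pvParts (s : String) : List String :=
  (PySem.Chars.splitOn (PySem.Chars.stripChars s.toList ['/']) ['/']).map String.ofList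

-- inner loop: count matching components from the end, stopping at first mismatch
def pvScore : List (String × String) → Int
  | [] => 0
  | (gp, lp) :: rest =>
      if PySem.Str.lower gp == PySem.Str.lower lp then 1 + pvScore rest else 0

-- last loop of A: track (best_match, best_score), strict > so the first maximum wins
def pvPathStep (grev : List String) (acc : Option String × Int) (lbl : String) : Option String × Int :=
  let score := pvScore (grev.zip (pvParts lbl).reverse)
  if acc.2 < score then (some lbl, score) else acc

-- Python truthiness of best_match (None or str)
def pvTruthy : Option String → Bool
  | none => false
  | some s => !(s == "")

def find_closest_label (generated : String) (valid_labels : List String) : String :=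
  let g := PySem.Str.strip generated
  if valid_labels.contains g then g
  else
    let gl := PySem.Str.lower g
    match valid_labels.find? (pvP1 gl) with
    | some lbl => lbl
    | none =>
      match valid_labels.find? (pvP2 g) with
      | some lbl => lbl
      | none =>
        match valid_labels.find? (pvP3 g) with
        | some lbl => lbl
        | none =>
          let grev := (pvParts g).reverse
          let bmbs := valid_labels.foldl (pvPathStep grev) (none, 0)
          if pvTruthy bmbs.1 && decide (0 < bmbs.2) then bmbs.1.getD "NA" else "NA"

-- ===== PORT B =====
-- single-pass state: first match of each category plus the best path match so far
structure PvBState where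
  ci : Option String
  sub1 : Option String
  sub2 : Option String
  bm : Option String
  bs : Int
deriving Repr, DecidableEq

def pvStepB (g gl : String) (grev : List String) (st : PvBState) (lbl : String) : PvBState :=
  let ci := if st.ci.isNone && pvP1 gl lbl then some lbl else st.ci
  let sub1 := if st.sub1.isNone && pvP2 g lbl then some lbl else st.sub1
  let sub2 := if st.sub2.isNone && pvP3 g lbl then some lbl else st.sub2
  let score := pvScore (grev.zip (pvParts lbl).reverse)
  if st.bs < score then ⟨ci, sub1, sub2, some lbl, score⟩ else ⟨ci, sub1, sub2, st.bm, st.bs⟩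

def find_closest_label_alt (generated : String) (valid_labels : List String) : String :=
  let g := PySem.Str.strip generated
  if valid_labels.contains g then g
  else
    let gl := PySem.Str.lower g
    let grev := (pvParts g).reverse
    let st := valid_labels.foldl (pvStepB g gl grev) ⟨none, none, none, none, 0⟩
    match st.ci with
    | some lbl => lbl
    | none =>
      match st.sub1 with
      | some lbl => lbl
      | none =>
        match st.sub2 with
        | some lbl => lbl
        | none =>
          if pvTruthy st.bm && decide (0 < st.bs) then st.bm.getD "NA" else "NA"

-- ===== PRECONDITION & SPEC =====
def Spec_find_closest_label (generated : String) (valid_labels : List String) (out : String) : Prop := out = find_closest_label_alt generated valid_labels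
instance (generated : String) (valid_labels : List String) (out : String) : Decidable (Spec_find_closest_label generated valid_labels out) := by unfold Spec_find_closest_label; infer_instance

-- ===== CLAIM (what is proved, stated in full; the proofs are below) =====
def Claim_equal_find_closest_label : Prop := ∀ (generated : String) (valid_labels : List String), Dom_find_closest_label generated valid_labels → Spec_find_closest_label generated valid_labels (find_closest_label generated valid_labels)

-- ===== LEMMAS AND PROOFS =====

-- the one-pass fold computes exactly the three first-matches and A's path fold
theorem pvFoldB_eq (g gl : String) (grev : List String) (l : List String)
    (c s1 s2 : Option String) (b : Option String) (bs : Int) :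
    l.foldl (pvStepB g gl grev) ⟨c, s1, s2, b, bs⟩ =
      ⟨(c.or (l.find? (pvP1 gl))),
       (s1.or (l.find? (pvP2 g))),
       (s2.or (l.find? (pvP3 g))),
       (l.foldl (pvPathStep grev) (b, bs)).1,
       (l.foldl (pvPathStep grev) (b, bs)).2⟩ := by
  induction l generalizing c s1 s2 b bs with
  | nil => simp [List.foldl]
  | cons hd tl ih =>
      simp only [List.foldl_cons, List.find?]
      rw [pvStepB, pvPathStep]
      cases c <;> cases s1 <;> cases s2 <;>
        by_cases h1 : pvP1 gl hd = true <;>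
        by_cases h2 : pvP2 g hd = true <;>
        by_cases h3 : pvP3 g hd = true <;>
        by_cases h4 : bs < pvScore (grev.zip (pvParts hd).reverse) <;>
        simp [h1, h2, h3, h4, ih]

theorem find_closest_label_spec : Claim_equal_find_closest_label := by
  intro generated valid_labels _
  unfold Spec_find_closest_label find_closest_label find_closest_label_alt
  simp only [pvFoldB_eq, Option.none_or]
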